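-- pv_equiv track=rewrite | github.com/syurskyi/Algorithms_and_Data_Structure | _algorithms_challenges/projecteuler/ProjectEuler-master(2)/ProjectEuler-master/279.py | count_120_triangle
-- ===== SOURCE A (Python) =====
-- def count_120_triangle(perimeter_bound):
--     result = 0
--     stack = [(0, 1, 1, 1)]
--     while stack:
--         a, b, c, d = stack.pop()
--         n = a + c
--         m = b + d
--         perimeter = (m + n) * (2 * m + n)
--         if perimeter > perimeter_bound:
--             continue
--         if (m - n) % 3 != 0:
--             result += perimeter_bound // perimeter
--         stack.append((a, b, n, m))
--         stack.append((n, m, c, d))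
--     return result
-- ===== SOURCE B (Python) =====
-- def count_120_triangle(perimeter_bound):
--     # Direct arithmetic enumeration: instead of walking the Stern-Brocot tree of
--     # (a,b,c,d) states, enumerate the coprime pairs n < m themselves with nested
--     # loops and a gcd test.  Correct because the tree's mediants are exactly the
--     # coprime pairs (n, m) with 1 <= n < m, each visited once, and the perimeter
--     # (m+n)(2m+n) only grows down the tree, so the pruned tree covers exactly
--     # those pairs with perimeter <= bound.
--     def gcd(x, y):
--         while y:
--             x, y = y, x % y
--         return x
--     total = 0
--     m = 2
--     while (m + 1) * (2 * m + 1) <= perimeter_bound: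
--         for n in range(1, m):
--             p = (m + n) * (2 * m + n)
--             if p > perimeter_bound:
--                 break
--             if (m - n) % 3 != 0 and gcd(m, n) == 1:
--                 total += perimeter_bound // p
--         m += 1
--     return total
-- ===== Notes on version B (the rewrite author's own statement) =====
-- stated objective: alternative
-- what changed: Replaces the Stern-Brocot-style tree walk over (a,b,c,d) states by a direct nested-loop enumeration of the coprime pairs n < m with a gcd test and early break once the perimeter exceeds the bound; correct because the tree's mediants are exactly the coprime proper pairs, each produced once, and the perimeter only grows down the tree.
import Mathlib
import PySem

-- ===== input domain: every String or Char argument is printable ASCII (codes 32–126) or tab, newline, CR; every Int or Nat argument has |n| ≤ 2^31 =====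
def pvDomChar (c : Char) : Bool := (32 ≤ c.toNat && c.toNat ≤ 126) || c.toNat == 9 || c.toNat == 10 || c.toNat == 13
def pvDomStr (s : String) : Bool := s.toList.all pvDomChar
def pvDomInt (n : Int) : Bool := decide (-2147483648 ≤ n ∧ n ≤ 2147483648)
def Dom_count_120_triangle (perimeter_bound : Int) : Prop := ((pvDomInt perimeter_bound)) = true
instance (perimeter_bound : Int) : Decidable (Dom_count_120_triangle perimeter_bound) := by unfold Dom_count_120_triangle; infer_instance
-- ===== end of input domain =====

-- B replaces A's Stern-Brocot-style tree walk over (a,b,c,d) states by a direct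
-- nested-loop enumeration of the coprime pairs n < m with a gcd test (objective:
-- alternative algorithm, same exact result). A's port carries a fuel parameter
-- solely to make its while-loop structural; the proofs show it is never exhausted.

-- ===== PORT A =====
-- Literal port of A's while-stack loop (head of the list = top of the stack).
def count_120_loopA (pb : Int) (fuel : Nat) (stack : List (Int × Int × Int × Int))
    (result : Int) : Int :=
  match fuel, stack with
  | _, [] => result
  | 0, _ => result          -- never reached with the fuel chosen below
  | f + 1, (a, b, c, d) :: rest =>
    let n := a + c
    let m := b + d
    let perimeter := (m + n) * (2 * m + n)
    if perimeter > pb then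
      count_120_loopA pb f rest result
    else
      count_120_loopA pb f ((n, m, c, d) :: (a, b, n, m) :: rest)
        (if PySem.Int.mod (m - n) 3 ≠ 0 then result + PySem.Int.floordiv pb perimeter
         else result)

def count_120_triangle (perimeter_bound : Int) : Int :=
  count_120_loopA perimeter_bound (3 ^ (perimeter_bound.toNat.sqrt + 1)) [(0, 1, 1, 1)] 0

-- ===== PORT B =====
-- Literal port of Source B: a hand-written Euclidean gcd (fuel only for termination),
-- an inner for-loop over range(1, m) with an early break, and an outer while-loop.
def count_120_gcd (fuel : Nat) (x y : Int) : Int :=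
  match fuel with
  | 0 => x
  | f + 1 => if y ≠ 0 then count_120_gcd f y (PySem.Int.mod x y) else x

def count_120_inner (pb m : Int) : List Int → Int → Int
  | [], total => total
  | n :: rest, total =>
    let p := (m + n) * (2 * m + n)
    if p > pb then total      -- break
    else count_120_inner pb m rest
      (if PySem.Int.mod (m - n) 3 ≠ 0 ∧ count_120_gcd (n.toNat + 1) m n = 1
       then total + PySem.Int.floordiv pb p else total)

def count_120_outer (pb : Int) (fuel : Nat) (m total : Int) : Int :=
  match fuel with
  | 0 => total              -- never reached with the fuel chosen below
  | f + 1 =>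
    if (m + 1) * (2 * m + 1) ≤ pb then
      count_120_outer pb f (m + 1) (count_120_inner pb m (PySem.List.pyRange 1 m 1) total)
    else total

def count_120_triangle_alt (perimeter_bound : Int) : Int :=
  count_120_outer perimeter_bound (perimeter_bound.toNat + 1) 2 0

-- ===== PRECONDITION & SPEC =====
def Spec_count_120_triangle (perimeter_bound : Int) (out : Int) : Prop := out = count_120_triangle_alt perimeter_bound
instance (perimeter_bound : Int) (out : Int) : Decidable (Spec_count_120_triangle perimeter_bound out) := by unfold Spec_count_120_triangle; infer_instance

-- ===== CLAIM (what is proved, stated in full; the proofs are below) =====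
def Claim_equal_count_120_triangle : Prop := ∀ (perimeter_bound : Int), Dom_count_120_triangle perimeter_bound → Spec_count_120_triangle perimeter_bound (count_120_triangle perimeter_bound)

-- ===== LEMMAS AND PROOFS =====

-- Invariant of every state reachable from (0, 1, 1, 1): positivity and the
-- Stern-Brocot determinant b*c - a*d = 1.
def pvInv (a b c d : Int) : Prop := 0 ≤ a ∧ 1 ≤ b ∧ 1 ≤ c ∧ 1 ≤ d ∧ b * c - a * d = 1

abbrev pvSt : Type := { t : Int × Int × Int × Int // pvInv t.1 t.2.1 t.2.2.1 t.2.2.2 }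

def pvN (t : pvSt) : Int := t.1.1 + t.1.2.2.1
def pvM (t : pvSt) : Int := t.1.2.1 + t.1.2.2.2
def pvPerim (t : pvSt) : Int := (pvM t + pvN t) * (2 * pvM t + pvN t)

def pvChild1 : pvSt → pvSt
  | ⟨(a, b, c, d), h⟩ =>
    ⟨(a, b, a + c, b + d), by
      obtain ⟨ha, hb, hc, hd, hdet⟩ := h
      dsimp only at ha hb hc hd hdet ⊢
      exact ⟨ha, hb, by omega, by omega, by linear_combination hdet⟩⟩

def pvChild2 : pvSt → pvSt
  | ⟨(a, b, c, d), h⟩ =>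
    ⟨(a + c, b + d, c, d), by
      obtain ⟨ha, hb, hc, hd, hdet⟩ := h
      dsimp only at ha hb hc hd hdet ⊢
      exact ⟨by omega, by omega, hc, hd, by linear_combination hdet⟩⟩

-- Potential: strictly dominates the number of loop iterations of A.
def pvMu (pb : Int) (t : pvSt) : Nat :=
  3 ^ (((pb.toNat.sqrt : Int) + 1) - (t.1.1 + t.1.2.1 + t.1.2.2.1 + t.1.2.2.2)).toNat

lemma pvMu_pos (pb : Int) (t : pvSt) : 1 ≤ pvMu pb t :=
  Nat.one_le_pow _ _ (by norm_num)

lemma pvPowLem (k1 k2 k : Nat) (h1 : k1 < k) (h2 : k2 < k) :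
    3 ^ k1 + 3 ^ k2 < 3 ^ k := by
  have e1 : 3 ^ k1 ≤ 3 ^ (k - 1) := Nat.pow_le_pow_right (by norm_num) (by omega)
  have e2 : 3 ^ k2 ≤ 3 ^ (k - 1) := Nat.pow_le_pow_right (by norm_num) (by omega)
  have e3 : 1 ≤ 3 ^ (k - 1) := Nat.one_le_pow _ _ (by norm_num)
  have e4 : 3 ^ (k - 1) * 3 = 3 ^ k := by
    rw [← Nat.pow_succ]; congr 1; omega
  omega

lemma pvSumBound (pb s : Int) (hs : 3 ≤ s) (hsq : s * s ≤ pb) :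
    s ≤ (pb.toNat.sqrt : Int) := by
  have h0 : (0 : Int) ≤ s := by omega
  have h1 : s.toNat * s.toNat ≤ pb.toNat := by
    have : ((s.toNat * s.toNat : Nat) : Int) ≤ ((pb.toNat : Nat) : Int) := by
      push_cast
      rw [Int.toNat_of_nonneg h0, Int.toNat_of_nonneg (le_trans (by nlinarith) hsq)]
      exact hsq
    exact_mod_cast this
  have h2 : s.toNat ≤ pb.toNat.sqrt := Nat.le_sqrt.mpr h1
  omega

lemma pvMu_children (pb : Int) (t : pvSt) (h : ¬ pvPerim t > pb) :
    pvMu pb (pvChild1 t) + pvMu pb (pvChild2 t) < pvMu pb t := by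
  obtain ⟨⟨a, b, c, d⟩, ha, hb, hc, hd, hdet⟩ := t
  dsimp only at ha hb hc hd hdet
  have hh : (b + d + (a + c)) * (2 * (b + d) + (a + c)) ≤ pb := not_lt.mp h
  have he : (b + d + (a + c)) * (2 * (b + d) + (a + c))
      = (a + b + c + d) * (a + b + c + d) + (a + b + c + d) * (b + d) := by ring
  rw [he] at hh
  have hs3 : 3 ≤ a + b + c + d := by omega
  have hsq : (a + b + c + d) * (a + b + c + d) ≤ pb := by nlinarith
  have hB : a + b + c + d ≤ (pb.toNat.sqrt : Int) := pvSumBound pb _ hs3 hsq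
  show 3 ^ (((pb.toNat.sqrt : Int) + 1) - (a + b + (a + c) + (b + d))).toNat
      + 3 ^ (((pb.toNat.sqrt : Int) + 1) - ((a + c) + (b + d) + c + d)).toNat
      < 3 ^ (((pb.toNat.sqrt : Int) + 1) - (a + b + c + d)).toNat
  exact pvPowLem _ _ _ (by omega) (by omega)

-- The value of one node of A's traversal tree: its gain plus its subtree's.
def pvVisit (pb : Int) (t : pvSt) : Int :=
  if h : pvPerim t > pb then 0
  else
    (if PySem.Int.mod (pvM t - pvN t) 3 ≠ 0 then PySem.Int.floordiv pb (pvPerim t) else 0)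
      + pvVisit pb (pvChild1 t) + pvVisit pb (pvChild2 t)
termination_by pvMu pb t
decreasing_by
  · have := pvMu_children pb t h
    have := pvMu_pos pb (pvChild2 t)
    omega
  · have := pvMu_children pb t h
    have := pvMu_pos pb (pvChild1 t)
    omega

lemma loopA_eq_sum (pb : Int) (fuel : Nat) :
    ∀ (stack : List pvSt) (result : Int),
      (stack.map (pvMu pb)).sum ≤ fuel →
      count_120_loopA pb fuel (stack.map Subtype.val) result
        = result + (stack.map (pvVisit pb)).sum := by
  induction fuel with
  | zero =>
    intro stack result hle
    cases stack with
    | nil => simp only [List.map_nil, List.sum_nil, add_zero]; rfl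
    | cons t rest =>
      exfalso
      have h1 := pvMu_pos pb t
      simp only [List.map_cons, List.sum_cons] at hle
      omega
  | succ f ih =>
    intro stack result hle
    cases stack with
    | nil => simp only [List.map_nil, List.sum_nil, add_zero]; rfl
    | cons t rest =>
      obtain ⟨⟨a, b, c, d⟩, hinv⟩ := t
      simp only [List.map_cons, List.sum_cons] at hle ⊢
      show count_120_loopA pb (f + 1) ((a, b, c, d) :: rest.map Subtype.val) result = _
      rw [count_120_loopA]
      have hp1 := pvMu_pos pb ⟨(a, b, c, d), hinv⟩
      by_cases h : ((b + d) + (a + c)) * (2 * (b + d) + (a + c)) > pb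
      · rw [if_pos h, ih rest result (by omega)]
        have h' : pvPerim ⟨(a, b, c, d), hinv⟩ > pb := h
        have hv : pvVisit pb ⟨(a, b, c, d), hinv⟩ = 0 := by
          rw [pvVisit, dif_pos h']
        rw [hv]
        ring
      · rw [if_neg h]
        have h' : ¬ pvPerim ⟨(a, b, c, d), hinv⟩ > pb := h
        have hmu := pvMu_children pb ⟨(a, b, c, d), hinv⟩ h'
        have hstep := ih (pvChild2 ⟨(a, b, c, d), hinv⟩ :: pvChild1 ⟨(a, b, c, d), hinv⟩ :: rest)
          (if PySem.Int.mod ((b + d) - (a + c)) 3 ≠ 0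
           then result + PySem.Int.floordiv pb (((b + d) + (a + c)) * (2 * (b + d) + (a + c)))
           else result)
          (by simp only [List.map_cons, List.sum_cons]; omega)
        have hlist : ((a + c, b + d, c, d) :: (a, b, a + c, b + d) :: List.map Subtype.val rest)
            = List.map Subtype.val
                (pvChild2 ⟨(a, b, c, d), hinv⟩ :: pvChild1 ⟨(a, b, c, d), hinv⟩ :: rest) := rfl
        rw [hlist]
        refine hstep.trans ?_
        simp only [List.map_cons, List.sum_cons]
        have hv : pvVisit pb ⟨(a, b, c, d), hinv⟩ =
            (if PySem.Int.mod ((b + d) - (a + c)) 3 ≠ 0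
             then PySem.Int.floordiv pb (((b + d) + (a + c)) * (2 * (b + d) + (a + c))) else 0)
              + pvVisit pb (pvChild1 ⟨(a, b, c, d), hinv⟩)
              + pvVisit pb (pvChild2 ⟨(a, b, c, d), hinv⟩) := by
          rw [pvVisit, dif_neg h']
          rfl
        rw [hv]
        split_ifs <;> ring

def pvInit : pvSt := ⟨(0, 1, 1, 1), ⟨le_refl 0, le_refl 1, le_refl 1, le_refl 1, by norm_num⟩⟩

lemma init_fuel (pb : Int) : pvMu pb pvInit ≤ 3 ^ (pb.toNat.sqrt + 1) := by
  show 3 ^ (((pb.toNat.sqrt : Int) + 1) - (0 + 1 + 1 + 1)).toNat ≤ 3 ^ (pb.toNat.sqrt + 1)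
  exact Nat.pow_le_pow_right (by norm_num) (by omega)

-- ---- The common target: a double sum over the rectangle [0, K) × [0, K) ----

def pvK (pb : Int) : Nat := pb.toNat + 2

-- The summand at (n, m): contribution of the pair, mod-3 test included.
def pvF (pb : Int) (n m : Nat) : Int :=
  if PySem.Int.mod ((m : Int) - n) 3 ≠ 0
  then PySem.Int.floordiv pb (((m : Int) + n) * (2 * (m : Int) + n)) else 0

-- Membership of the coprime pair (n, m) in the subtree of the state (a,b,c,d):
-- strictly inside the interval (a/b, c/d), coprime, perimeter within bound.
abbrev pvInSQ (pb a b c d : Int) (n m : Nat) : Prop :=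
  1 ≤ b * n - a * m ∧ 1 ≤ c * m - d * n ∧ Nat.gcd m n = 1
    ∧ ((m : Int) + n) * (2 * (m : Int) + n) ≤ pb

def pvSumQ (pb a b c d : Int) : Int :=
  ∑ m ∈ Finset.range (pvK pb), ∑ n ∈ Finset.range (pvK pb),
    (if pvInSQ pb a b c d n m then pvF pb n m else 0)

-- B's summand: pairs at the root state (0,1,1,1).
def pvG (pb : Int) (n m : Nat) : Int :=
  if pvInSQ pb 0 1 1 1 n m then pvF pb n m else 0

-- ---- generic sum-splitting lemmas ----

lemma pv_sum_if_le_split (K a : Nat) (ha : a < K) (g : Nat → Int) :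
    ∑ j ∈ Finset.range K, (if a ≤ j then g j else 0)
      = g a + ∑ j ∈ Finset.range K, (if a + 1 ≤ j then g j else 0) := by
  have hpt : ∀ j, (if a ≤ j then g j else 0)
      = (if j = a then g j else 0) + (if a + 1 ≤ j then g j else 0) := by
    intro j; split_ifs <;> omega
  rw [Finset.sum_congr rfl (fun j _ => hpt j), Finset.sum_add_distrib,
    Finset.sum_ite_eq' (Finset.range K) a g]
  simp [ha]

lemma pv_sum2_if_eq (K na ma : Nat) (h1 : na < K) (h2 : ma < K) (g : Nat → Nat → Int) :
    ∑ m ∈ Finset.range K, ∑ n ∈ Finset.range K,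
        (if n = na ∧ m = ma then g n m else 0) = g na ma := by
  have hin : ∀ m, ∑ n ∈ Finset.range K, (if n = na ∧ m = ma then g n m else 0)
      = (if m = ma then g na m else 0) := by
    intro m
    by_cases hm : m = ma
    · simp only [hm, and_true, if_true]
      rw [Finset.sum_ite_eq' (Finset.range K) na (fun n => g n ma)]
      simp [h1]
    · simp [hm]
  rw [Finset.sum_congr rfl (fun m _ => hin m),
    Finset.sum_ite_eq' (Finset.range K) ma (fun m => g na m)]
  simp [h2]

-- ---- perimeter monotonicity ----

lemma pv_perim_mono (n0 m0 n m : Int) (hn0 : 1 ≤ n0) (hm0 : 1 ≤ m0)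
    (hn : n0 ≤ n) (hm : m0 ≤ m) :
    (m0 + n0) * (2 * m0 + n0) ≤ (m + n) * (2 * m + n) := by
  have h1 : m0 + n0 ≤ m + n := by omega
  have h2 : 2 * m0 + n0 ≤ 2 * m + n := by omega
  nlinarith

-- ---- Stern-Brocot interval facts ----

-- any pair strictly inside the interval dominates the mediant componentwise
lemma pv_inS_ge (a b c d : Int) (hI : pvInv a b c d) (n m : Nat)
    (hα : 1 ≤ b * n - a * m) (hβ : 1 ≤ c * m - d * n) :
    a + c ≤ (n : Int) ∧ b + d ≤ (m : Int) := by
  obtain ⟨ha, hb, hc, hd, hdet⟩ := hI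
  have hn : (n : Int) = c * (b * n - a * m) + a * (c * m - d * n) := by
    linear_combination (-(n : Int)) * hdet
  have hm : (m : Int) = d * (b * n - a * m) + b * (c * m - d * n) := by
    linear_combination (-(m : Int)) * hdet
  constructor
  · nlinarith [mul_le_mul_of_nonneg_left hα (by omega : (0:Int) ≤ c),
      mul_le_mul_of_nonneg_left hβ ha]
  · nlinarith [mul_le_mul_of_nonneg_left hα (by omega : (0:Int) ≤ d),
      mul_le_mul_of_nonneg_left hβ (by omega : (0:Int) ≤ b)]

-- the mediant is coprime
lemma pv_med_gcd (a b c d : Int) (hI : pvInv a b c d) :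
    Nat.gcd (b + d).toNat (a + c).toNat = 1 := by
  obtain ⟨ha, hb, hc, hd, hdet⟩ := hI
  set g := Nat.gcd (b + d).toNat (a + c).toNat with hgdef
  have hgB : (g : Int) ∣ (b + d) := by
    have h := Nat.gcd_dvd_left (b + d).toNat (a + c).toNat
    have := Int.natCast_dvd_natCast.mpr h
    rwa [Int.toNat_of_nonneg (by omega : (0:Int) ≤ b + d)] at this
  have hgA : (g : Int) ∣ (a + c) := by
    have h := Nat.gcd_dvd_right (b + d).toNat (a + c).toNat
    have := Int.natCast_dvd_natCast.mpr h
    rwa [Int.toNat_of_nonneg (by omega : (0:Int) ≤ a + c)] at this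
  have hone : (g : Int) ∣ 1 := by
    have h := dvd_sub (hgA.mul_left b) (hgB.mul_left a)
    rwa [show b * (a + c) - a * (b + d) = 1 from by linear_combination hdet] at h
  have : g ∣ 1 := by exact_mod_cast hone
  exact Nat.dvd_one.mp this

-- a coprime pair on the mediant line IS the mediant
lemma pv_med_unique (a b c d : Int) (hI : pvInv a b c d) (n m : Nat)
    (hg : Nat.gcd m n = 1) (hα : 1 ≤ b * n - a * m)
    (heq : b * n - a * m = c * m - d * n) :
    (n : Int) = a + c ∧ (m : Int) = b + d := by
  obtain ⟨ha, hb, hc, hd, hdet⟩ := hI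
  have hn0 : (0:Int) ≤ (n : Int) := Int.natCast_nonneg n
  have hm0 : (0:Int) ≤ (m : Int) := Int.natCast_nonneg m
  have hβ : 1 ≤ c * m - d * n := heq ▸ hα
  have hm1 : 1 ≤ (m : Int) := by nlinarith [mul_nonneg (by omega : (0:Int) ≤ d) hn0]
  have hZ : (n : Int) * (b + d) = (m : Int) * (a + c) := by linear_combination heq
  have hAnn : (0:Int) ≤ a + c := by omega
  have hBnn : (0:Int) ≤ b + d := by omega
  have hNat : n * (b + d).toNat = m * (a + c).toNat := by
    have h1 : ((n * (b + d).toNat : Nat) : Int) = ((m * (a + c).toNat : Nat) : Int) := by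
      push_cast [Int.toNat_of_nonneg hAnn, Int.toNat_of_nonneg hBnn]
      linarith [hZ]
    exact_mod_cast h1
  have hmpos : 0 < m := by exact_mod_cast (by omega : (1:Int) ≤ (m : Int))
  have hcop : Nat.Coprime m n := hg
  have hdvd : m ∣ (b + d).toNat :=
    hcop.dvd_of_dvd_mul_right ⟨(a + c).toNat, by rw [Nat.mul_comm (b + d).toNat n, hNat]⟩
  obtain ⟨t, hB⟩ := hdvd
  have hA : (a + c).toNat = n * t :=
    Nat.eq_of_mul_eq_mul_left hmpos (by rw [← hNat, hB]; ring)
  have hAc : ((n * t : Nat) : Int) = a + c := by rw [← hA]; exact Int.toNat_of_nonneg hAnn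
  have hBc : ((m * t : Nat) : Int) = b + d := by rw [← hB]; exact Int.toNat_of_nonneg hBnn
  push_cast at hAc hBc
  have ht : (t : Int) * (b * n - a * m) = 1 := by
    linear_combination b * hAc - a * hBc + hdet
  rcases Int.mul_eq_one_iff_eq_one_or_neg_one.mp ht with ⟨h1', h2'⟩ | ⟨h1', h2'⟩
  · have ht1 : (t : Int) = 1 := h1'
    constructor
    · rw [← hAc, ht1]; ring
    · rw [← hBc, ht1]; ring
  · exfalso
    have : (0:Int) ≤ (t : Int) := Int.natCast_nonneg t
    omega

-- ---- the heart: pointwise partition of the subtree's pairs ----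

lemma pv_heart (pb a b c d : Int) (hI : pvInv a b c d)
    (hp : ((b + d) + (a + c)) * (2 * (b + d) + (a + c)) ≤ pb) (n m : Nat) :
    (if pvInSQ pb a b c d n m then pvF pb n m else 0)
      = (if n = (a + c).toNat ∧ m = (b + d).toNat then pvF pb n m else 0)
        + (if pvInSQ pb a b (a + c) (b + d) n m then pvF pb n m else 0)
        + (if pvInSQ pb (a + c) (b + d) c d n m then pvF pb n m else 0) := by
  obtain ⟨ha, hb, hc, hd, hdet⟩ := hI
  have hInv : pvInv a b c d := ⟨ha, hb, hc, hd, hdet⟩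
  have e1 : (a + c) * (m:Int) - (b + d) * (n:Int)
      = (c * m - d * n) - (b * n - a * m) := by ring
  have e2 : (b + d) * (n:Int) - (a + c) * (m:Int)
      = (b * n - a * m) - (c * m - d * n) := by ring
  by_cases hs : pvInSQ pb a b c d n m
  · obtain ⟨hα, hβ, hg, hpn⟩ := hs
    by_cases heq : b * (n:Int) - a * m = c * m - d * n
    · obtain ⟨hn', hm'⟩ := pv_med_unique a b c d hInv n m hg hα heq
      have hmed : n = (a + c).toNat ∧ m = (b + d).toNat := by omega
      have hnc1 : ¬ pvInSQ pb a b (a + c) (b + d) n m := by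
        rintro ⟨-, h2, -, -⟩
        rw [e1, ← heq] at h2
        omega
      have hnc2 : ¬ pvInSQ pb (a + c) (b + d) c d n m := by
        rintro ⟨h1, -, -, -⟩
        rw [e2, heq] at h1
        omega
      rw [if_pos (⟨hα, hβ, hg, hpn⟩ : pvInSQ pb a b c d n m), if_pos hmed,
        if_neg hnc1, if_neg hnc2]
      ring
    · have hmedF : ¬ (n = (a + c).toNat ∧ m = (b + d).toNat) := by
        rintro ⟨h1, h2⟩
        have hn' : (n : Int) = a + c := by omega
        have hm' : (m : Int) = b + d := by omega
        apply heq
        rw [hn', hm']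
        ring
      by_cases hlt : b * (n:Int) - a * m < c * m - d * n
      · have hc1 : pvInSQ pb a b (a + c) (b + d) n m :=
          ⟨hα, by rw [e1]; omega, hg, hpn⟩
        have hnc2 : ¬ pvInSQ pb (a + c) (b + d) c d n m := by
          rintro ⟨h1, -, -, -⟩
          rw [e2] at h1
          omega
        rw [if_pos (⟨hα, hβ, hg, hpn⟩ : pvInSQ pb a b c d n m), if_neg hmedF,
          if_pos hc1, if_neg hnc2]
        ring
      · have hgt : c * (m:Int) - d * n < b * n - a * m := by omega
        have hc2 : pvInSQ pb (a + c) (b + d) c d n m :=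
          ⟨by rw [e2]; omega, hβ, hg, hpn⟩
        have hnc1 : ¬ pvInSQ pb a b (a + c) (b + d) n m := by
          rintro ⟨-, h2, -, -⟩
          rw [e1] at h2
          omega
        rw [if_pos (⟨hα, hβ, hg, hpn⟩ : pvInSQ pb a b c d n m), if_neg hmedF,
          if_neg hnc1, if_pos hc2]
        ring
  · have hmedF : ¬ (n = (a + c).toNat ∧ m = (b + d).toNat) := by
      rintro ⟨h1, h2⟩
      have hn' : (n : Int) = a + c := by omega
      have hm' : (m : Int) = b + d := by omega
      apply hs
      refine ⟨?_, ?_, ?_, ?_⟩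
      · have : b * (n:Int) - a * m = 1 := by rw [hn', hm']; linear_combination hdet
        omega
      · have : c * (m:Int) - d * n = 1 := by rw [hn', hm']; linear_combination hdet
        omega
      · rw [h1, h2]; exact pv_med_gcd a b c d hInv
      · rw [hn', hm']; exact hp
    have hnc1 : ¬ pvInSQ pb a b (a + c) (b + d) n m := by
      rintro ⟨h1, h2, h3, h4⟩
      rw [e1] at h2
      exact hs ⟨h1, by omega, h3, h4⟩
    have hnc2 : ¬ pvInSQ pb (a + c) (b + d) c d n m := by
      rintro ⟨h1, h2, h3, h4⟩
      rw [e2] at h1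
      exact hs ⟨by omega, h2, h3, h4⟩
    rw [if_neg hs, if_neg hmedF, if_neg hnc1, if_neg hnc2]
    ring

-- ---- A's tree sum equals the rectangle sum ----

lemma pv_visit_eq_sum (pb : Int) :
    ∀ (k : Nat) (s : pvSt), pvMu pb s ≤ k →
      pvVisit pb s = pvSumQ pb s.1.1 s.1.2.1 s.1.2.2.1 s.1.2.2.2 := by
  intro k
  induction k with
  | zero =>
    intro s hle
    exact absurd hle (by have := pvMu_pos pb s; omega)
  | succ k ih =>
    rintro ⟨⟨a, b, c, d⟩, hinv⟩ hle
    have hInv : pvInv a b c d := hinv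
    obtain ⟨ha, hb, hc, hd, hdet⟩ := hInv
    have hInv' : pvInv a b c d := ⟨ha, hb, hc, hd, hdet⟩
    show pvVisit pb ⟨(a, b, c, d), hinv⟩ = pvSumQ pb a b c d
    by_cases h : pvPerim ⟨(a, b, c, d), hinv⟩ > pb
    · rw [pvVisit, dif_pos h]
      symm
      refine Finset.sum_eq_zero fun m _ => Finset.sum_eq_zero fun n _ => ?_
      rw [if_neg]
      rintro ⟨h1, h2, -, h4⟩
      obtain ⟨hge1, hge2⟩ := pv_inS_ge a b c d hInv' n m h1 h2
      have hmono := pv_perim_mono (a + c) (b + d) n m (by omega) (by omega) hge1 hge2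
      have hps : pvPerim ⟨(a, b, c, d), hinv⟩
          = ((b + d) + (a + c)) * (2 * (b + d) + (a + c)) := rfl
      rw [hps] at h
      linarith
    · have hP : ((b + d) + (a + c)) * (2 * (b + d) + (a + c)) ≤ pb := not_lt.mp h
      have hmu := pvMu_children pb ⟨(a, b, c, d), hinv⟩ h
      have hp1 := pvMu_pos pb (pvChild1 ⟨(a, b, c, d), hinv⟩)
      have hp2 := pvMu_pos pb (pvChild2 ⟨(a, b, c, d), hinv⟩)
      have hch1 := ih (pvChild1 ⟨(a, b, c, d), hinv⟩) (by omega)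
      have hch2 := ih (pvChild2 ⟨(a, b, c, d), hinv⟩) (by omega)
      have hch1' : pvVisit pb (pvChild1 ⟨(a, b, c, d), hinv⟩)
          = pvSumQ pb a b (a + c) (b + d) := hch1
      have hch2' : pvVisit pb (pvChild2 ⟨(a, b, c, d), hinv⟩)
          = pvSumQ pb (a + c) (b + d) c d := hch2
      -- bounds on the mediant
      have hMN : (b + d) + (a + c) ≤ pb := by nlinarith
      have hNA : ((a + c).toNat : Int) = a + c := Int.toNat_of_nonneg (by omega)
      have hMA : ((b + d).toNat : Int) = b + d := Int.toNat_of_nonneg (by omega)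
      have hNAlt : (a + c).toNat < pvK pb := by unfold pvK; omega
      have hMAlt : (b + d).toNat < pvK pb := by unfold pvK; omega
      have hsplit : pvSumQ pb a b c d
          = pvF pb (a + c).toNat (b + d).toNat
            + pvSumQ pb a b (a + c) (b + d) + pvSumQ pb (a + c) (b + d) c d := by
        unfold pvSumQ
        rw [Finset.sum_congr rfl fun m _ => Finset.sum_congr rfl fun n _ =>
          pv_heart pb a b c d hInv' hP n m]
        simp only [Finset.sum_add_distrib]
        rw [pv_sum2_if_eq (pvK pb) (a + c).toNat (b + d).toNat hNAlt hMAlt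
          (fun n m => pvF pb n m)]
      have hfmed : (if PySem.Int.mod (pvM ⟨(a, b, c, d), hinv⟩ - pvN ⟨(a, b, c, d), hinv⟩) 3 ≠ 0
          then PySem.Int.floordiv pb (pvPerim ⟨(a, b, c, d), hinv⟩) else 0)
          = pvF pb (a + c).toNat (b + d).toNat := by
        unfold pvF
        rw [hNA, hMA]
        rfl
      rw [pvVisit, dif_neg h, hsplit, hch1', hch2', hfmed]

-- ---- B-side: gcd port is gcd ----

lemma pv_gcd_step (x y : Int) : Int.gcd y (x % y) = Int.gcd x y := by
  apply Nat.dvd_antisymm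
  · apply Int.dvd_gcd
    · have h1 : (↑(Int.gcd y (x % y)) : Int) ∣ y := Int.gcd_dvd_left _ _
      have h2 : (↑(Int.gcd y (x % y)) : Int) ∣ x % y := Int.gcd_dvd_right _ _
      have h3 := dvd_add (h1.mul_right (x / y)) h2
      rwa [Int.mul_ediv_add_emod] at h3
    · exact Int.gcd_dvd_left _ _
  · apply Int.dvd_gcd
    · exact Int.gcd_dvd_right _ _
    · have h1 : (↑(Int.gcd x y) : Int) ∣ x := Int.gcd_dvd_left _ _
      have h2 : (↑(Int.gcd x y) : Int) ∣ y := Int.gcd_dvd_right _ _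
      have h3 := dvd_sub h1 (h2.mul_right (x / y))
      rwa [← Int.emod_def] at h3

lemma pv_gcd_eq : ∀ (f : Nat) (x y : Int), 0 ≤ x → 0 ≤ y → y.toNat < f →
    count_120_gcd f x y = (Int.gcd x y : Int) := by
  intro f
  induction f with
  | zero => intro x y _ _ hf; omega
  | succ f ih =>
    intro x y hx hy hf
    show (if y ≠ 0 then count_120_gcd f y (PySem.Int.mod x y) else x) = _
    by_cases hy0 : y = 0
    · subst hy0
      simp only [ne_eq, not_true_eq_false, if_false]
      rw [Int.gcd_zero_right, Int.natAbs_of_nonneg hx]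
    · have hypos : 0 < y := by omega
      rw [if_pos hy0, PySem.Int.mod_eq_emod_of_pos hypos,
        ih y (x % y) hy (Int.emod_nonneg x hy0) (by
          have h1 := Int.emod_nonneg x hy0
          have h2 := Int.emod_lt_of_pos x hypos
          omega),
        pv_gcd_step]

-- ---- B-side: the inner loop sums a row ----

lemma pv_inner_eq (pb : Int) :
    ∀ (k n m : Nat), m - n ≤ k → 1 ≤ n → n ≤ m → m < pvK pb → ∀ (acc : Int),
      count_120_inner pb (m : Int) (PySem.List.pyRange (n : Int) (m : Int) 1) acc
        = acc + ∑ j ∈ Finset.range (pvK pb), (if n ≤ j then pvG pb j m else 0) := by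
  intro k
  induction k with
  | zero =>
    intro n m hk h1 hnm hmK acc
    have hnm' : n = m := by omega
    subst hnm'
    rw [PySem.List.pyRange_one_eq_nil (le_refl _)]
    have hnil : count_120_inner pb ((n : Nat) : Int) [] acc = acc := rfl
    have hz : ∑ j ∈ Finset.range (pvK pb), (if n ≤ j then pvG pb j n else 0) = 0 := by
      refine Finset.sum_eq_zero fun j _ => ?_
      split_ifs with hj
      · unfold pvG
        rw [if_neg]
        rintro ⟨hx1, hx2, -, -⟩
        omega
      · rfl
    rw [hnil, hz]
    ring
  | succ k ih =>
    intro n m hk h1 hnm hmK acc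
    rcases Nat.eq_or_lt_of_le hnm with hnm' | hlt
    · subst hnm'
      rw [PySem.List.pyRange_one_eq_nil (le_refl _)]
      have hnil : count_120_inner pb ((n : Nat) : Int) [] acc = acc := rfl
      have hz : ∑ j ∈ Finset.range (pvK pb), (if n ≤ j then pvG pb j n else 0) = 0 := by
        refine Finset.sum_eq_zero fun j _ => ?_
        split_ifs with hj
        · unfold pvG
          rw [if_neg]
          rintro ⟨hx1, hx2, -, -⟩
          omega
        · rfl
      rw [hnil, hz]
      ring
    · have hltZ : (n : Int) < (m : Int) := by exact_mod_cast hlt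
      rw [PySem.List.pyRange_one_cons hltZ]
      have hstep : count_120_inner pb (m : Int)
            ((n : Int) :: PySem.List.pyRange ((n : Int) + 1) (m : Int) 1) acc
          = if ((m : Int) + n) * (2 * (m : Int) + n) > pb then acc
            else count_120_inner pb (m : Int) (PySem.List.pyRange ((n : Int) + 1) (m : Int) 1)
              (if PySem.Int.mod ((m : Int) - n) 3 ≠ 0
                  ∧ count_120_gcd ((n : Int).toNat + 1) (m : Int) (n : Int) = 1
               then acc + PySem.Int.floordiv pb (((m : Int) + n) * (2 * (m : Int) + n))
               else acc) := rfl
      rw [hstep]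
      by_cases hbp : ((m : Int) + n) * (2 * (m : Int) + n) > pb
      · rw [if_pos hbp]
        have hz : ∑ j ∈ Finset.range (pvK pb), (if n ≤ j then pvG pb j m else 0) = 0 := by
          refine Finset.sum_eq_zero fun j _ => ?_
          split_ifs with hj
          · unfold pvG
            rw [if_neg]
            rintro ⟨hx1, hx2, -, hx4⟩
            have hmono := pv_perim_mono (n : Int) (m : Int) (j : Int) (m : Int)
              (by exact_mod_cast h1) (by omega) (by exact_mod_cast hj) (le_refl _)
            linarith
          · rfl
        omega
      · rw [if_neg hbp]
        have hcast : ((n : Int) + 1) = ((n + 1 : Nat) : Int) := by push_cast; ring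
        rw [hcast]
        rw [ih (n + 1) m (by omega) (by omega) (by omega) hmK]
        rw [pv_sum_if_le_split (pvK pb) n (by omega) (fun j => pvG pb j m)]
        have hgcd : count_120_gcd ((n : Int).toNat + 1) (m : Int) (n : Int)
            = ((Nat.gcd m n : Nat) : Int) := by
          rw [pv_gcd_eq _ _ _ (Int.natCast_nonneg m) (Int.natCast_nonneg n)
            (by simp), Int.gcd_natCast_natCast]
        have hkey : (if PySem.Int.mod ((m : Int) - n) 3 ≠ 0
              ∧ count_120_gcd ((n : Int).toNat + 1) (m : Int) (n : Int) = 1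
            then acc + PySem.Int.floordiv pb (((m : Int) + n) * (2 * (m : Int) + n))
            else acc) = acc + pvG pb n m := by
          rw [hgcd]
          unfold pvG pvF
          by_cases hg : Nat.gcd m n = 1
          · by_cases hmod : PySem.Int.mod ((m : Int) - n) 3 ≠ 0
            · rw [if_pos ⟨hmod, by exact_mod_cast hg⟩,
                if_pos (⟨by omega, by omega, hg, not_lt.mp hbp⟩ : pvInSQ pb 0 1 1 1 n m),
                if_pos hmod]
            · rw [if_neg (by tauto),
                if_pos (⟨by omega, by omega, hg, not_lt.mp hbp⟩ : pvInSQ pb 0 1 1 1 n m),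
                if_neg hmod]
              ring
          · rw [if_neg (fun hcon => hg (by exact_mod_cast hcon.2)),
              if_neg (fun hcon => hg hcon.2.2.1)]
            ring
        rw [hkey]
        ring

-- ---- B-side: the outer loop sums the rows ----

def pvRow (pb : Int) (m : Nat) : Int := ∑ n ∈ Finset.range (pvK pb), pvG pb n m

lemma pv_row_zero (pb : Int) (m : Nat) (h : pb < ((m : Int) + 1) * (2 * m + 1)) :
    pvRow pb m = 0 := by
  refine Finset.sum_eq_zero fun n _ => ?_
  unfold pvG
  rw [if_neg]
  rintro ⟨h1, h2, -, h4⟩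
  have hn1 : 1 ≤ (n : Int) := by omega
  have hmono := pv_perim_mono 1 m n m (le_refl _) (by omega) hn1 (le_refl _)
  have he : ((m:Int) + 1) * (2 * m + 1) = ((m:Int) + 1) * (2 * (m:Int) + 1) := by ring
  linarith

lemma pvG_zero_n (pb : Int) (m : Nat) : pvG pb 0 m = 0 := by
  unfold pvG
  rw [if_neg]
  rintro ⟨h1, -, -, -⟩
  omega

lemma pv_outer_eq (pb : Int) :
    ∀ (fuel m : Nat) (acc : Int), 2 ≤ m → pb < (m : Int) + fuel →
      count_120_outer pb fuel (m : Int) acc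
        = acc + ∑ j ∈ Finset.range (pvK pb), (if m ≤ j then pvRow pb j else 0) := by
  intro fuel
  induction fuel with
  | zero =>
    intro m acc h2 hfb
    have hnil : count_120_outer pb 0 (m : Int) acc = acc := rfl
    have hz : ∑ j ∈ Finset.range (pvK pb), (if m ≤ j then pvRow pb j else 0) = 0 := by
      refine Finset.sum_eq_zero fun j _ => ?_
      split_ifs with hj
      · refine pv_row_zero pb j ?_
        have hmj : (m : Int) ≤ (j : Int) := by exact_mod_cast hj
        push_cast at hfb
        nlinarith [Int.natCast_nonneg j]
      · rfl
    rw [hnil, hz]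
    ring
  | succ f ih =>
    intro m acc h2 hfb
    have hstep : count_120_outer pb (f + 1) (m : Int) acc
        = if ((m : Int) + 1) * (2 * (m : Int) + 1) ≤ pb then
            count_120_outer pb f ((m : Int) + 1)
              (count_120_inner pb (m : Int) (PySem.List.pyRange 1 (m : Int) 1) acc)
          else acc := rfl
    rw [hstep]
    by_cases hcond : ((m : Int) + 1) * (2 * (m : Int) + 1) ≤ pb
    · rw [if_pos hcond]
      have hm2 : (2 : Int) ≤ (m : Int) := by exact_mod_cast h2
      have hmpb : (m : Int) ≤ pb := by nlinarith
      have hmK : m < pvK pb := by unfold pvK; omega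
      have hone : ((1 : Nat) : Int) = (1 : Int) := by norm_num
      have hinner := pv_inner_eq pb m 1 m (by omega) (le_refl _) (by omega) hmK acc
      rw [hone] at hinner
      rw [hinner]
      have hrow : ∑ j ∈ Finset.range (pvK pb), (if 1 ≤ j then pvG pb j m else 0)
          = pvRow pb m := by
        refine Finset.sum_congr rfl fun j _ => ?_
        rcases Nat.eq_zero_or_pos j with hj | hj
        · subst hj
          rw [if_neg (by omega), pvG_zero_n]
        · rw [if_pos (by omega : 1 ≤ j)]
      rw [hrow]
      have hcast : ((m : Int) + 1) = ((m + 1 : Nat) : Int) := by push_cast; ring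
      rw [hcast, ih (m + 1) (acc + pvRow pb m) (by omega) (by push_cast; push_cast at hfb; omega)]
      rw [pv_sum_if_le_split (pvK pb) m hmK (pvRow pb)]
      ring
    · rw [if_neg hcond]
      have hz : ∑ j ∈ Finset.range (pvK pb), (if m ≤ j then pvRow pb j else 0) = 0 := by
        refine Finset.sum_eq_zero fun j _ => ?_
        split_ifs with hj
        · refine pv_row_zero pb j ?_
          have hmj : (m : Int) ≤ (j : Int) := by exact_mod_cast hj
          have hm2 : (2 : Int) ≤ (m : Int) := by exact_mod_cast h2
          nlinarith
        · rfl
      rw [hz]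
      ring

-- ===== VERDICT (by name: the statement is the Claim_ definition above) =====
lemma pvRow_small (pb : Int) (m : Nat) (hm : m < 2) : pvRow pb m = 0 := by
  refine Finset.sum_eq_zero fun n _ => ?_
  unfold pvG
  rw [if_neg]
  rintro ⟨h1, h2, -, -⟩
  interval_cases m <;> omega

theorem count_120_triangle_spec : Claim_equal_count_120_triangle := by
  intro pb _
  unfold Spec_count_120_triangle count_120_triangle count_120_triangle_alt
  have hA := loopA_eq_sum pb (3 ^ (pb.toNat.sqrt + 1)) [pvInit] 0
    (by simpa using init_fuel pb)
  have hAv : count_120_loopA pb (3 ^ (pb.toNat.sqrt + 1)) [(0, 1, 1, 1)] 0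
      = pvVisit pb pvInit := by
    have h0 : ([(0, 1, 1, 1)] : List (Int × Int × Int × Int)) = [pvInit].map Subtype.val := rfl
    rw [h0, hA]
    simp
  have hAs : pvVisit pb pvInit = pvSumQ pb 0 1 1 1 :=
    pv_visit_eq_sum pb (pvMu pb pvInit) pvInit (le_refl _)
  have htwo : ((2 : Nat) : Int) = (2 : Int) := by norm_num
  have hB := pv_outer_eq pb (pb.toNat + 1) 2 0 (le_refl _) (by push_cast; omega)
  rw [htwo] at hB
  rw [hAv, hAs, hB]
  have hsum : ∑ j ∈ Finset.range (pvK pb), (if 2 ≤ j then pvRow pb j else 0)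
      = ∑ j ∈ Finset.range (pvK pb), pvRow pb j := by
    refine Finset.sum_congr rfl fun j _ => ?_
    rcases Nat.lt_or_ge j 2 with hj | hj
    · rw [if_neg (by omega), pvRow_small pb j hj]
    · rw [if_pos hj]
  rw [hsum]
  unfold pvSumQ pvRow pvG
  ring
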